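-- pv_equiv track=rewrite | github.com/btrif/Python_dev_repo | Algorithms/partition_custom.py | partition_nr_into_given_set_of_nrs
-- ===== SOURCE A (Python) =====
-- def partition_nr_into_given_set_of_nrs(nr, S):
--     S = sorted(S, reverse=True)
--     def inner(n, i):
--         if n == 0:
--             yield []
--         for k in range(i, len(S) ):
--             if S[k] <= n:
--                 for rest in inner(n - S[k] , k):
--                     yield [ S[k] ] + rest
--     return list( inner(nr, 0) )
-- ===== SOURCE B (Python) =====
-- def partition_nr_into_given_set_of_nrs(nr, S):
--     S = sorted(S, reverse=True)
--     res = []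
--     stack = [(nr, 0, [])]
--     while stack:
--         n, i, prefix = stack.pop()
--         if n == 0:
--             res.append(prefix)
--         for k in reversed(range(i, len(S))):
--             if S[k] <= n:
--                 stack.append((n - S[k], k, prefix + [S[k]]))
--     return res
-- ===== Notes on version B (the rewrite author's own statement) =====
-- stated objective: alternative
-- what changed: Replaces A's recursive generator (nested inner() calls re-yielding and re-prefixing each sub-result) by an iterative DFS over an explicit stack of (remaining, start_index, prefix) states that pushes children in reverse so pops reproduce A's pre-order; full prefixes are emitted directly instead of being rebuilt by prepending at every recursion level.
import Mathlib
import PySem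

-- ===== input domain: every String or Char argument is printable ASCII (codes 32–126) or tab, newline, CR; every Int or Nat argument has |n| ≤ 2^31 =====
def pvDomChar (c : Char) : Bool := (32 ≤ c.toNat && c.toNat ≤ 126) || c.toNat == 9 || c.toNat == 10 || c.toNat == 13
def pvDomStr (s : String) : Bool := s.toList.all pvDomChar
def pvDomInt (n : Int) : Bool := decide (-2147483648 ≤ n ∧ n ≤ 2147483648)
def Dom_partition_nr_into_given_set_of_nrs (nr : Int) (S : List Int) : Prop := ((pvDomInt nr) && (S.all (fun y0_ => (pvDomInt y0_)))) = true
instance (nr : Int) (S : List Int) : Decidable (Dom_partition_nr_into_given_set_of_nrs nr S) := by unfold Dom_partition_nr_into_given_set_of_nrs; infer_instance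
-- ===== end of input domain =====

-- B replaces A's recursive generator by an iterative DFS with an explicit stack of
-- (remaining, start_index, prefix) states; same return value, same emission order ("alternative").

-- ===== PORT A =====
-- A's recursive generator inner(n, i); the fuel argument is only a totality guard:
-- under Pre_ every part is ≥ 1 (or no part is ever ≤ n), so recursion depth is < nr.toNat + 1.
def pvInnerA (S : List Int) : Nat → Int → Nat → List (List Int)
  | 0, _, _ => []
  | fuel + 1, n, i =>
      (if n = 0 then [[]] else []) ++
      (List.range' i (S.length - i)).flatMap
        (fun k => if S.getD k 0 ≤ n then
            (pvInnerA S fuel (n - S.getD k 0) k).map (fun rest => S.getD k 0 :: rest)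
          else [])

def partition_nr_into_given_set_of_nrs (nr : Int) (S : List Int) : List (List Int) :=
  pvInnerA (PySem.List.sorted S (fun x => x) true) (nr.toNat + 1) nr 0

-- ===== PORT B =====
-- B's while-loop over the explicit stack (head = top of stack; Python pushes the children
-- reversed and pops from the end, which is the same as putting them in ascending-k order in
-- front of the rest).  The fuel argument is only a totality guard: under Pre_ the number of
-- pops is at most (|S|+1)^(nr.toNat+1).
def pvRunB (S : List Int) : Nat → List (Int × Nat × List Int) → List (List Int) → List (List Int)
  | _, [], res => res
  | 0, _ :: _, res => res
  | fuel + 1, (n, i, pfx) :: rest, res =>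
      pvRunB S fuel
        (((List.range' i (S.length - i)).flatMap
            (fun k => if S.getD k 0 ≤ n then
                [(n - S.getD k 0, k, pfx ++ [S.getD k 0])] else [])) ++ rest)
        (if n = 0 then res ++ [pfx] else res)

def partition_nr_into_given_set_of_nrs_alt (nr : Int) (S : List Int) : List (List Int) :=
  pvRunB (PySem.List.sorted S (fun x => x) true)
    (((PySem.List.sorted S (fun x => x) true).length + 1) ^ (nr.toNat + 1))
    [(nr, 0, [])] []

-- ===== PRECONDITION & SPEC =====
-- Pre_ is exactly the set of inputs on which the Python A terminates: if some part is ≤ 0 and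
-- some part is ≤ nr, inner() recurses forever (RecursionError); no returning input is excluded.
def Pre_partition_nr_into_given_set_of_nrs (nr : Int) (S : List Int) : Prop :=
  (∀ s ∈ S, 0 < s) ∨ (∀ s ∈ S, nr < s)
instance (nr : Int) (S : List Int) : Decidable (Pre_partition_nr_into_given_set_of_nrs nr S) := by
  unfold Pre_partition_nr_into_given_set_of_nrs; infer_instance

def pvWitness_partition_nr_into_given_set_of_nrs : Int × List Int := (4, [1, 2])

def Spec_partition_nr_into_given_set_of_nrs (nr : Int) (S : List Int) (out : List (List Int)) : Prop := out = partition_nr_into_given_set_of_nrs_alt nr S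
instance (nr : Int) (S : List Int) (out : List (List Int)) : Decidable (Spec_partition_nr_into_given_set_of_nrs nr S out) := by unfold Spec_partition_nr_into_given_set_of_nrs; infer_instance

-- ===== CLAIM (what is proved, stated in full; the proofs are below) =====
def Claim_equal_partition_nr_into_given_set_of_nrs : Prop := ∀ (nr : Int) (S : List Int), Dom_partition_nr_into_given_set_of_nrs nr S → Pre_partition_nr_into_given_set_of_nrs nr S → Spec_partition_nr_into_given_set_of_nrs nr S (partition_nr_into_given_set_of_nrs nr S)

-- ===== LEMMAS AND PROOFS =====

-- number of states B pops while exploring the tree of inner(n, i)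
def pvSizeA (S : List Int) : Nat → Int → Nat → Nat
  | 0, _, _ => 1
  | fuel + 1, n, i =>
      1 + ((List.range' i (S.length - i)).map
        (fun k => if S.getD k 0 ≤ n then pvSizeA S fuel (n - S.getD k 0) k else 0)).sum

def pvPhi (S : List Int) (stack : List (Int × Nat × List Int)) : Nat :=
  (stack.map (fun st => pvSizeA S (st.1.toNat + 1) st.1 st.2.1)).sum

def pvG (S : List Int) (st : Int × Nat × List Int) : List (List Int) :=
  (pvInnerA S (st.1.toNat + 1) st.1 st.2.1).map (fun r => st.2.2 ++ r)

lemma pv_mem_range' {i L k : Nat} (h : k ∈ List.range' i (L - i)) : i ≤ k ∧ k < L := by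
  rw [List.mem_range'_1] at h; omega

lemma pv_part_pos {S : List Int} (hpos : ∀ s ∈ S, 0 < s) {k : Nat} (hk : k < S.length) :
    0 < S.getD k 0 := by
  rw [List.getD_eq_getElem S 0 hk]; exact hpos _ (List.getElem_mem hk)

lemma pvInnerA_stab {S : List Int} (hpos : ∀ s ∈ S, 0 < s) :
    ∀ (f g : Nat) (n : Int) (i : Nat), n.toNat < f → n.toNat < g →
      pvInnerA S f n i = pvInnerA S g n i := by
  intro f
  induction f with
  | zero => intro g n i hf; omega
  | succ f ih =>
      intro g n i hf hg
      cases g with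
      | zero => omega
      | succ g =>
          simp only [pvInnerA]
          congr 1
          apply List.flatMap_congr
          intro k hk
          have hkL := (pv_mem_range' hk).2
          by_cases hle : S.getD k 0 ≤ n
          · have hp := pv_part_pos hpos hkL
            rw [if_pos hle, if_pos hle, ih g (n - S.getD k 0) k (by omega) (by omega)]
          · rw [if_neg hle, if_neg hle]

lemma pvSizeA_stab {S : List Int} (hpos : ∀ s ∈ S, 0 < s) :
    ∀ (f g : Nat) (n : Int) (i : Nat), n.toNat < f → n.toNat < g →
      pvSizeA S f n i = pvSizeA S g n i := by
  intro f
  induction f with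
  | zero => intro g n i hf; omega
  | succ f ih =>
      intro g n i hf hg
      cases g with
      | zero => omega
      | succ g =>
          simp only [pvSizeA]
          congr 1
          refine congrArg List.sum (List.map_congr_left ?_)
          intro k hk
          have hkL := (pv_mem_range' hk).2
          by_cases hle : S.getD k 0 ≤ n
          · have hp := pv_part_pos hpos hkL
            rw [if_pos hle, if_pos hle]
            exact ih g (n - S.getD k 0) k (by omega) (by omega)
          · rw [if_neg hle, if_neg hle]

lemma pvSizeA_le_pow (S : List Int) :
    ∀ (f : Nat) (n : Int) (i : Nat), pvSizeA S f n i ≤ (S.length + 1) ^ f := by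
  intro f
  induction f with
  | zero => intro n i; simp [pvSizeA]
  | succ f ih =>
      intro n i
      simp only [pvSizeA]
      have hsum : ((List.range' i (S.length - i)).map
          (fun k => if S.getD k 0 ≤ n then pvSizeA S f (n - S.getD k 0) k else 0)).sum
          ≤ (S.length - i) * (S.length + 1) ^ f := by
        have := List.sum_le_card_nsmul
          ((List.range' i (S.length - i)).map
            (fun k => if S.getD k 0 ≤ n then pvSizeA S f (n - S.getD k 0) k else 0))
          ((S.length + 1) ^ f) ?_
        · simpa [List.length_range'] using this
        · intro x hx
          obtain ⟨k, _, rfl⟩ := List.mem_map.1 hx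
          by_cases hle : S.getD k 0 ≤ n
          · rw [if_pos hle]; exact ih (n - S.getD k 0) k
          · rw [if_neg hle]; exact Nat.zero_le _
      have hpow : 0 < (S.length + 1) ^ f := Nat.pow_pos (by omega)
      have hexp : (S.length + 1) ^ (f + 1) = (S.length + 1) ^ f + S.length * (S.length + 1) ^ f := by
        ring
      rw [hexp]
      have : (S.length - i) * (S.length + 1) ^ f ≤ S.length * (S.length + 1) ^ f :=
        Nat.mul_le_mul_right _ (by omega)
      omega

lemma pvPhi_append (S : List Int) (l₁ l₂ : List (Int × Nat × List Int)) :
    pvPhi S (l₁ ++ l₂) = pvPhi S l₁ + pvPhi S l₂ := by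
  simp [pvPhi]

lemma pvPhi_flatMap {α : Type} (S : List Int) (l : List α)
    (h : α → List (Int × Nat × List Int)) :
    pvPhi S (l.flatMap h) = (l.map (fun x => pvPhi S (h x))).sum := by
  induction l with
  | nil => simp [pvPhi]
  | cons x t ih => simp [List.flatMap_cons, pvPhi_append, ih]

-- the popped node's size is 1 + the sizes of the children it pushes
lemma pvSizeA_children {S : List Int} (hpos : ∀ s ∈ S, 0 < s) (n : Int) (i : Nat)
    (p : List Int) :
    pvSizeA S (n.toNat + 1) n i
      = 1 + pvPhi S ((List.range' i (S.length - i)).flatMap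
          (fun k => if S.getD k 0 ≤ n then
              [(n - S.getD k 0, k, p ++ [S.getD k 0])] else [])) := by
  rw [pvPhi_flatMap]
  simp only [pvSizeA]
  congr 1
  refine congrArg List.sum (List.map_congr_left ?_)
  intro k hk
  have hkL := (pv_mem_range' hk).2
  by_cases hle : S.getD k 0 ≤ n
  · have hp := pv_part_pos hpos hkL
    rw [if_pos hle, if_pos hle]
    simp only [pvPhi, List.map_cons, List.map_nil, List.sum_cons, List.sum_nil]
    rw [pvSizeA_stab hpos (n.toNat) ((n - S.getD k 0).toNat + 1) _ _ (by omega) (by omega)]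
    omega
  · rw [if_neg hle, if_neg hle]; simp [pvPhi]

-- the results of the popped node are its base-case emission followed by the children's results
lemma pvG_children {S : List Int} (hpos : ∀ s ∈ S, 0 < s) (n : Int) (i : Nat) (p : List Int) :
    pvG S (n, i, p)
      = (if n = 0 then [p] else []) ++
        ((List.range' i (S.length - i)).flatMap
          (fun k => if S.getD k 0 ≤ n then
              [(n - S.getD k 0, k, p ++ [S.getD k 0])] else [])).flatMap (pvG S) := by
  simp only [pvG, pvInnerA, List.map_append]
  congr 1
  · split_ifs <;> simp
  · rw [List.map_flatMap, List.flatMap_assoc]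
    apply List.flatMap_congr
    intro k hk
    have hkL := (pv_mem_range' hk).2
    by_cases hle : S.getD k 0 ≤ n
    · have hp := pv_part_pos hpos hkL
      rw [if_pos hle, if_pos hle]
      simp only [List.flatMap_cons, List.flatMap_nil, List.append_nil]
      simp only [pvG, List.map_map]
      rw [pvInnerA_stab hpos (n.toNat) ((n - S.getD k 0).toNat + 1) _ _ (by omega) (by omega)]
      apply List.map_congr_left
      intro r _
      simp
    · rw [if_neg hle, if_neg hle]; simp

-- main loop invariant: with enough fuel, B's loop appends each stack state's subtree results
lemma pvRunB_eq {S : List Int} (hpos : ∀ s ∈ S, 0 < s) :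
    ∀ (fuel : Nat) (stack : List (Int × Nat × List Int)) (res : List (List Int)),
      pvPhi S stack ≤ fuel →
      pvRunB S fuel stack res = res ++ stack.flatMap (pvG S) := by
  intro fuel
  induction fuel with
  | zero =>
      intro stack res h
      cases stack with
      | nil => simp [pvRunB]
      | cons st rest =>
          exfalso
          have : 1 ≤ pvSizeA S (st.1.toNat + 1) st.1 st.2.1 := by
            cases h' : st.1.toNat + 1 <;> simp [pvSizeA]
          simp only [pvPhi, List.map_cons, List.sum_cons] at h
          omega
  | succ fuel ih =>
      intro stack res h
      cases stack with
      | nil => simp [pvRunB]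
      | cons st rest =>
          obtain ⟨n, i, p⟩ := st
          simp only [pvRunB]
          have hsz := pvSizeA_children hpos n i p
          have hphi : pvPhi S ((n, i, p) :: rest) = pvSizeA S (n.toNat + 1) n i + pvPhi S rest := by
            simp [pvPhi]
          rw [hphi] at h
          rw [ih _ _ (by rw [pvPhi_append]; omega)]
          rw [List.flatMap_cons, List.flatMap_append]
          rw [pvG_children hpos n i p]
          split_ifs with h0 <;> simp

lemma pv_sorted_pos {S : List Int} (hpos : ∀ s ∈ S, 0 < s) :
    ∀ s ∈ PySem.List.sorted S (fun x => x) true, 0 < s := by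
  intro s hs
  exact hpos s ((PySem.List.mem_sorted _ _ _ _).1 hs)

lemma pv_sorted_gt {nr : Int} {S : List Int} (hgt : ∀ s ∈ S, nr < s) :
    ∀ s ∈ PySem.List.sorted S (fun x => x) true, nr < s := by
  intro s hs
  exact hgt s ((PySem.List.mem_sorted _ _ _ _).1 hs)

-- both ports on the all-parts-positive case
lemma pv_main_pos (nr : Int) {S : List Int}
    (hpos : ∀ s ∈ PySem.List.sorted S (fun x => x) true, 0 < s) :
    partition_nr_into_given_set_of_nrs nr S = partition_nr_into_given_set_of_nrs_alt nr S := by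
  unfold partition_nr_into_given_set_of_nrs partition_nr_into_given_set_of_nrs_alt
  set S' := PySem.List.sorted S (fun x => x) true with hS'
  have hfuel : pvPhi S' [(nr, 0, [])] ≤ (S'.length + 1) ^ (nr.toNat + 1) := by
    simp only [pvPhi, List.map_cons, List.map_nil, List.sum_cons, List.sum_nil, Nat.add_zero]
    exact pvSizeA_le_pow S' (nr.toNat + 1) nr 0
  rw [pvRunB_eq hpos _ _ _ hfuel]
  simp [pvG]

-- both ports when every part exceeds nr and nr ≠ 0: no branch fires, both return []
lemma pv_main_gt {nr : Int} {S : List Int} (hnz : nr ≠ 0)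
    (hgt : ∀ s ∈ PySem.List.sorted S (fun x => x) true, nr < s) :
    partition_nr_into_given_set_of_nrs nr S = partition_nr_into_given_set_of_nrs_alt nr S := by
  unfold partition_nr_into_given_set_of_nrs partition_nr_into_given_set_of_nrs_alt
  set S' := PySem.List.sorted S (fun x => x) true with hS'
  have hnone : ∀ k ∈ List.range' 0 (S'.length - 0), ¬ (S'.getD k 0 ≤ nr) := by
    intro k hk
    have hkL := (pv_mem_range' hk).2
    rw [List.getD_eq_getElem S' 0 hkL]
    have := hgt _ (List.getElem_mem hkL)
    omega
  have hA : pvInnerA S' (nr.toNat + 1) nr 0 = [] := by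
    simp only [pvInnerA, if_neg hnz, List.nil_append]
    rw [List.flatMap_eq_nil_iff]
    intro k hk
    rw [if_neg (hnone k hk)]
  have hch : (List.range' 0 (S'.length - 0)).flatMap
      (fun k => if S'.getD k 0 ≤ nr then
          [(nr - S'.getD k 0, k, ([] : List Int) ++ [S'.getD k 0])] else []) = [] := by
    rw [List.flatMap_eq_nil_iff]
    intro k hk
    rw [if_neg (hnone k hk)]
  obtain ⟨f, hf⟩ : ∃ f, (S'.length + 1) ^ (nr.toNat + 1) = f + 1 :=
    ⟨(S'.length + 1) ^ (nr.toNat + 1) - 1, by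
      have : 0 < (S'.length + 1) ^ (nr.toNat + 1) := Nat.pow_pos (by omega)
      omega⟩
  rw [hA, hf]
  simp only [pvRunB, if_neg hnz]
  rw [hch]
  cases f <;> simp [pvRunB]

-- ===== VERDICT (by name: the statement is the Claim_ definition above) =====
theorem partition_nr_into_given_set_of_nrs_spec : Claim_equal_partition_nr_into_given_set_of_nrs := by
  intro nr S _ hpre
  unfold Spec_partition_nr_into_given_set_of_nrs
  rcases hpre with hpos | hgt
  · exact pv_main_pos nr (pv_sorted_pos hpos)
  · by_cases hnz : nr = 0
    · subst hnz
      exact pv_main_pos 0 (pv_sorted_pos (fun s hs => hgt s hs))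
    · exact pv_main_gt hnz (pv_sorted_gt hgt)
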